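-- pv_equiv track=rewrite | github.com/CURRYGEDDON/Bioinformatics-Projects | Peptide Encoding/PeptideEncoding.py | checkIfSubStringInmRNA
-- ===== SOURCE A (Python) =====
-- import itertools
--
-- def checkIfSubStringInmRNA(mRNASequence, aminoAcidList):
--     #itertool function creates every possible permutation from a list of lists i.e [1,2,3],[1,2] would return
--     #[1,1],[1,2],[2,1],[2,2],[3,1],[3,2],
--     possibleAminoAcidStrings = list(itertools.product(*aminoAcidList))
--     numSubStrings = len(possibleAminoAcidStrings)
--     for i in range(numSubStrings):
--         substring = "".join(possibleAminoAcidStrings[i])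
--         substring.replace(" ", "")
--         if substring in mRNASequence:
--             return True, substring
--     else:
--         return False, "none"
-- ===== SOURCE B (Python) =====
-- def checkIfSubStringInmRNA(mRNASequence, aminoAcidList):
--     # DFS over choices in product order, pruning with the set of match positions:
--     # returns the same first combination as full product enumeration, without materialising it.
--     n = len(mRNASequence)
--
--     def dfs(i, positions):
--         if not positions:
--             return None
--         if i == len(aminoAcidList):
--             return []
--         for piece in aminoAcidList[i]:
--             nxt = [p + len(piece) for p in positions if mRNASequence.startswith(piece, p)]
--             rest = dfs(i + 1, nxt)
--             if rest is not None:
--                 return [piece] + rest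
--         return None
--
--     combo = dfs(0, list(range(n + 1)))
--     if combo is None:
--         return False, "none"
--     return True, "".join(combo)
-- ===== Notes on version B (the rewrite author's own statement) =====
-- stated objective: faster
-- what changed: Replaces full materialisation of itertools.product followed by one substring search per combination with a product-order DFS over the axes that carries the list of mRNA positions still matching the joined prefix, pruning dead prefixes and stopping at the first full match.
import Mathlib
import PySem

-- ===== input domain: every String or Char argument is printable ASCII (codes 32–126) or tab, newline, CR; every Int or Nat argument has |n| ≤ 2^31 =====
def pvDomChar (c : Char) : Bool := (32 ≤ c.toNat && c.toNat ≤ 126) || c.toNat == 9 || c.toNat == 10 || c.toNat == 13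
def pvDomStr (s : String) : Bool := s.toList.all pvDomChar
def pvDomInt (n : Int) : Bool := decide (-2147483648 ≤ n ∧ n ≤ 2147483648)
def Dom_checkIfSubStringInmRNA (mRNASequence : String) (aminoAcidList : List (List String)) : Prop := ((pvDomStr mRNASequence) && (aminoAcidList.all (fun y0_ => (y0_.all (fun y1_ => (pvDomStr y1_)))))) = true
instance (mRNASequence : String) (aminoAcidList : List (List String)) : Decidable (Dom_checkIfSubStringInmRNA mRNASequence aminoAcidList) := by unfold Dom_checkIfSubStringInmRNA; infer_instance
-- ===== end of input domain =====

-- B replaces full enumeration of itertools.product with a product-order DFS that prunes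
-- via the set of positions where the joined prefix matches (objective: faster).

-- ===== PORT A =====
-- itertools.product(*aminoAcidList): tuples in lexicographic order, first axis slowest
def pvProduct : List (List String) → List (List String)
  | [] => [[]]
  | xs :: rest => xs.flatMap (fun x => (pvProduct rest).map (x :: ·))

-- the for-loop over the product list: join, (dead) replace, membership test, early return
def pvLoopA (m : String) : List (List String) → Bool × String
  | [] => (false, "none")
  | c :: rest =>
    let substring := PySem.Str.join "" c
    if PySem.Str.isIn substring m then (true, substring) else pvLoopA m rest

def checkIfSubStringInmRNA (mRNASequence : String) (aminoAcidList : List (List String)) : Bool × String :=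
  let possibleAminoAcidStrings := pvProduct aminoAcidList
  pvLoopA mRNASequence possibleAminoAcidStrings

-- ===== PORT B =====
-- positions surviving after consuming `piece` (m.startswith(piece, p) is exact as
-- piece <+: s.drop p for 0 ≤ p ≤ len(s), the only p ever in the list)
def pvAdvance (s : List Char) (S : List Nat) (piece : String) : List Nat :=
  (S.filter (fun p => PySem.Chars.startswith (s.drop p) piece.toList)).map
    (fun p => p + piece.toList.length)

def pvDfs (s : List Char) : List (List String) → List Nat → Option (List String)
  | _, [] => none
  | [], _ :: _ => some []
  | xs :: rest, S =>
    xs.findSome? (fun x => (pvDfs s rest (pvAdvance s S x)).map (x :: ·))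

def checkIfSubStringInmRNA_alt (mRNASequence : String) (aminoAcidList : List (List String)) : Bool × String :=
  let s := mRNASequence.toList
  match pvDfs s aminoAcidList (List.range (s.length + 1)) with
  | none => (false, "none")
  | some combo => (true, PySem.Str.join "" combo)

-- ===== PRECONDITION & SPEC =====
def Spec_checkIfSubStringInmRNA (mRNASequence : String) (aminoAcidList : List (List String)) (out : Bool × String) : Prop := out = checkIfSubStringInmRNA_alt mRNASequence aminoAcidList
instance (mRNASequence : String) (aminoAcidList : List (List String)) (out : Bool × String) : Decidable (Spec_checkIfSubStringInmRNA mRNASequence aminoAcidList out) := by unfold Spec_checkIfSubStringInmRNA; infer_instance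

-- ===== CLAIM (what is proved, stated in full; the proofs are below) =====
def Claim_equal_checkIfSubStringInmRNA : Prop := ∀ (mRNASequence : String) (aminoAcidList : List (List String)), Dom_checkIfSubStringInmRNA mRNASequence aminoAcidList → Spec_checkIfSubStringInmRNA mRNASequence aminoAcidList (checkIfSubStringInmRNA mRNASequence aminoAcidList)

-- ===== LEMMAS AND PROOFS =====

-- c matches s starting at position p (piece by piece)
def pvMatch (s : List Char) (p : Nat) : List String → Bool
  | [] => true
  | x :: c => PySem.Chars.startswith (s.drop p) x.toList && pvMatch s (p + x.toList.length) c

lemma pv_startswith_eq_decide (s p : List Char) :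
    PySem.Chars.startswith s p = decide (p <+: s) := by
  by_cases h : p <+: s
  · simp [(PySem.Chars.startswith_iff _ _).2 h, h]
  · have : PySem.Chars.startswith s p = false := by
      rw [Bool.eq_false_iff]; exact fun hc => h ((PySem.Chars.startswith_iff _ _).1 hc)
    simp [this, h]

lemma pv_join_nil_toList (c : List String) :
    (PySem.Str.join "" c).toList = (c.map String.toList).flatten := by
  rw [PySem.Str.toList_join]
  show PySem.Chars.join [] _ = _
  induction c with
  | nil => simp [PySem.Chars.join_nil]
  | cons x c ih =>
    cases c with
    | nil => simp [PySem.Chars.join, List.intercalate]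
    | cons y c' =>
      simp only [List.map_cons] at ih ⊢
      rw [PySem.Chars.join_cons_cons]
      simp [ih]

lemma pv_prefix_append_iff (a b t : List Char) :
    (a ++ b <+: t) ↔ (a <+: t ∧ b <+: t.drop a.length) := by
  constructor
  · rintro ⟨r, hr⟩
    refine ⟨⟨b ++ r, by simpa using hr⟩, ⟨r, ?_⟩⟩
    have : t.drop a.length = b ++ r := by rw [← hr]; simp
    rw [this]
  · rintro ⟨ha, ⟨r, hr⟩⟩
    refine ⟨r, ?_⟩
    have ht : a ++ t.drop a.length = t := by
      obtain ⟨u, hu⟩ := ha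
      rw [← hu]; simp
    calc a ++ b ++ r = a ++ (b ++ r) := by simp
      _ = a ++ t.drop a.length := by rw [hr]
      _ = t := ht

lemma pvMatch_iff_prefix (s : List Char) (c : List String) (p : Nat) :
    pvMatch s p c = decide ((c.map String.toList).flatten <+: s.drop p) := by
  induction c generalizing p with
  | nil => simp [pvMatch]
  | cons x c ih =>
    simp only [pvMatch, ih, List.map_cons, List.flatten_cons, pv_startswith_eq_decide,
      pv_prefix_append_iff, List.drop_drop, Bool.decide_and]

lemma pv_find_flatMap {α β : Type} (xs : List α) (f : α → List β) (p : β → Bool) :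
    (xs.flatMap f).find? p = xs.findSome? (fun x => (f x).find? p) := by
  induction xs with
  | nil => simp
  | cons x xs ih =>
    rw [List.flatMap_cons, List.find?_append, List.findSome?_cons]
    cases h : (f x).find? p <;> simp [ih]

-- the DFS computes exactly "first element of the product whose join matches at some position in S"
lemma pvDfs_eq_find (s : List Char) (l : List (List String)) (S : List Nat) :
    pvDfs s l S = (pvProduct l).find? (fun c => S.any (fun p => pvMatch s p c)) := by
  induction l generalizing S with
  | nil =>
    cases S with
    | nil => simp [pvDfs, pvProduct]
    | cons q S' => simp [pvDfs, pvProduct, pvMatch]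
  | cons xs rest ih =>
    cases S with
    | nil =>
      simp only [pvDfs]
      symm
      simp [List.find?_eq_none]
    | cons q S' =>
      simp only [pvDfs, pvProduct]
      rw [pv_find_flatMap]
      have hfun : (fun x => (pvDfs s rest (pvAdvance s (q :: S') x)).map (x :: ·)) =
          (fun x => ((pvProduct rest).map (x :: ·)).find?
            (fun c => (q :: S').any fun p => pvMatch s p c)) := by
        funext x
        rw [List.find?_map, ih]
        have : ((fun c => (q :: S').any fun p => pvMatch s p c) ∘ (x :: ·)) =
            (fun c => (pvAdvance s (q :: S') x).any fun p => pvMatch s p c) := by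
          funext c
          simp [Function.comp, pvMatch, pvAdvance, List.any_map, List.any_filter]
        rw [this]
      rw [hfun]

-- membership of the joined combo equals "matches at some position p ≤ len"
lemma pv_isIn_eq_any (m : String) (c : List String) :
    PySem.Str.isIn (PySem.Str.join "" c) m =
      (List.range (m.toList.length + 1)).any (fun p => pvMatch (m.toList) p c) := by
  set s := m.toList with hs
  have hj := pv_join_nil_toList c
  by_cases h : PySem.Str.isIn (PySem.Str.join "" c) m = true
  · rw [h]
    have hinf := (PySem.Str.isIn_iff_infix _ _).1 h
    rw [hj] at hinf
    have hex : ∃ j, (c.map String.toList).flatten <+: s.drop j := by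
      rw [PySem.Chars.exists_prefix_drop_iff_isIn, PySem.Chars.isIn_iff_infix]
      exact hinf
    obtain ⟨j, hjp⟩ := hex
    symm
    rw [List.any_eq_true]
    by_cases hle : j ≤ s.length
    · exact ⟨j, List.mem_range.2 (by omega), by rw [pvMatch_iff_prefix]; simpa using hjp⟩
    · have hd : s.drop j = [] := List.drop_eq_nil_of_le (by omega)
      rw [hd, List.prefix_nil] at hjp
      exact ⟨0, List.mem_range.2 (by omega), by rw [pvMatch_iff_prefix, hjp]; simp⟩
  · rw [Bool.eq_false_iff.2 h]
    symm
    rw [Bool.eq_false_iff]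
    intro hany
    apply h
    rw [List.any_eq_true] at hany
    obtain ⟨p, _, hp⟩ := hany
    rw [pvMatch_iff_prefix] at hp
    rw [PySem.Str.isIn_iff_infix, hj, ← PySem.Chars.isIn_iff_infix,
      ← PySem.Chars.exists_prefix_drop_iff_isIn]
    exact ⟨p, by simpa using hp⟩

lemma pvLoopA_eq_find (m : String) (cs : List (List String)) :
    pvLoopA m cs =
      match cs.find? (fun c => PySem.Str.isIn (PySem.Str.join "" c) m) with
      | none => (false, "none")
      | some c => (true, PySem.Str.join "" c) := by
  induction cs with
  | nil => simp [pvLoopA]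
  | cons c rest ih =>
    cases hc : PySem.Chars.isIn (PySem.Chars.join [] (List.map String.toList c)) m.toList with
    | true => simp [pvLoopA, hc]
    | false => simp [pvLoopA, hc, ih]

-- ===== VERDICT (by name: the statement is the Claim_ definition above) =====
theorem checkIfSubStringInmRNA_spec : Claim_equal_checkIfSubStringInmRNA := by
  intro m l _
  show checkIfSubStringInmRNA m l = checkIfSubStringInmRNA_alt m l
  unfold checkIfSubStringInmRNA checkIfSubStringInmRNA_alt
  have hpred : (fun c => PySem.Str.isIn (PySem.Str.join "" c) m) =
      (fun c => (List.range (m.toList.length + 1)).any fun p => pvMatch (m.toList) p c) := by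
    funext c; exact pv_isIn_eq_any m c
  simp only [pvLoopA_eq_find, pvDfs_eq_find, hpred]
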